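-- pv_equiv track=rewrite | github.com/tanchihpin0517/NTU | deepmir/hw3/hw3/analyze.py | events_to_bars
-- ===== SOURCE A (Python) =====
-- def events_to_bars(events):
--     bars = []
--     bar = []
--     for e in events:
--         if e == 'bar' and len(bar) > 0:
--             if bar[0] == 'bar':
--                 bars.append(bar)
--             bar = []
--         bar.append(e)
--     if len(bar) > 0:
--         bars.append(bar)
--     return bars
-- ===== SOURCE B (Python) =====
-- def events_to_bars(events):
--     # search-and-slice: jump to the first 'bar', then cut at each following 'bar'
--     try:
--         i = events.index('bar')
--     except ValueError:
--         return [events] if events else []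
--     bars = []
--     rest = events[i:]
--     while True:
--         try:
--             k = rest.index('bar', 1)
--         except ValueError:
--             bars.append(rest)
--             return bars
--         bars.append(rest[:k])
--         rest = rest[k:]
-- ===== Notes on version B (the rewrite author's own statement) =====
-- stated objective: alternative
-- what changed: A builds bars element-by-element with a running accumulator that is flushed or discarded at each 'bar'; B instead searches for the first 'bar' with list.index and then repeatedly slices the list at the next 'bar' occurrence, handling the no-'bar' and empty cases up front.
import Mathlib
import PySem

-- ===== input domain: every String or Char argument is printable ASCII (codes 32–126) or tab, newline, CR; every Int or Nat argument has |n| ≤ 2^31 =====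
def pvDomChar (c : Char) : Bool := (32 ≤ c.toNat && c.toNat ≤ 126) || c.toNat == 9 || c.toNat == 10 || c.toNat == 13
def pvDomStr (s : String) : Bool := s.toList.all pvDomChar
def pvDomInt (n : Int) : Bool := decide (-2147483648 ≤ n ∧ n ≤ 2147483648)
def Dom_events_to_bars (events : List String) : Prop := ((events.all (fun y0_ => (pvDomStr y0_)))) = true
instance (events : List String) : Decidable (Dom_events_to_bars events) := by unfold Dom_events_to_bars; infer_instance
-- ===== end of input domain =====

-- B replaces A's element-by-element accumulator loop with a search-and-slice pass
-- (jump to the first 'bar', then cut at each following 'bar'); alternative decomposition, same cost.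

-- ===== PORT A =====
-- one iteration of A's for-loop: state = (bars, bar)
def etbStep (st : List (List String) × List String) (e : String) : List (List String) × List String :=
  if e = "bar" ∧ st.2.length > 0 then
    ((if st.2.head? = some "bar" then st.1 ++ [st.2] else st.1), [e])
  else (st.1, st.2 ++ [e])

def events_to_bars (events : List String) : List (List String) :=
  let st := events.foldl etbStep ([], [])
  if st.2.length > 0 then st.1 ++ [st.2] else st.1

-- ===== PORT B =====
-- B's while-loop: rest always starts with 'bar'; Python's rest.index('bar', 1) is ported as
-- index? on rest.drop 1 (Python's k equals our k + 1); exact, all indices are nonnegative.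
def ebAltLoop (rest : List String) : List (List String) :=
  match h : PySem.List.index? (rest.drop 1) "bar" with
  | none => [rest]
  | some k => rest.take (k + 1) :: ebAltLoop (rest.drop (k + 1))
termination_by rest.length
decreasing_by
  have hm : "bar" ∈ rest.drop 1 := (PySem.List.index?_isSome_iff _ _).mp (by rw [h]; rfl)
  have h1 : rest.drop 1 ≠ [] := by intro hh; rw [hh] at hm; simp at hm
  have h2 : 1 ≤ rest.length := by
    cases rest with
    | nil => simp at h1
    | cons a l => simp
  rw [List.length_drop]; omega

def events_to_bars_alt (events : List String) : List (List String) :=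
  match PySem.List.index? events "bar" with
  | none => if events = [] then [] else [events]
  | some i => ebAltLoop (events.drop i)

-- ===== PRECONDITION & SPEC =====
def Spec_events_to_bars (events : List String) (out : List (List String)) : Prop := out = events_to_bars_alt events
instance (events : List String) (out : List (List String)) : Decidable (Spec_events_to_bars events out) := by unfold Spec_events_to_bars; infer_instance

-- ===== CLAIM (what is proved, stated in full; the proofs are below) =====
def Claim_equal_events_to_bars : Prop := ∀ (events : List String), Dom_events_to_bars events → Spec_events_to_bars events (events_to_bars events)

-- ===== LEMMAS AND PROOFS =====

lemma ebAltLoop_none (rest : List String) (h : PySem.List.index? (rest.drop 1) "bar" = none) :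
    ebAltLoop rest = [rest] := by
  rw [ebAltLoop]
  split
  · rfl
  · rename_i k heq
    rw [h] at heq
    cases heq

lemma ebAltLoop_some (rest : List String) (k : Nat)
    (h : PySem.List.index? (rest.drop 1) "bar" = some k) :
    ebAltLoop rest = rest.take (k + 1) :: ebAltLoop (rest.drop (k + 1)) := by
  rw [ebAltLoop]
  split
  · rename_i heq
    rw [h] at heq
    cases heq
  · rename_i k' heq
    rw [h] at heq
    injection heq with hk
    subst hk
    rfl

-- A's loop as structural recursion without the bars accumulator
def goA (bar : List String) (es : List String) : List (List String) :=
  match es with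
  | [] => if bar.length > 0 then [bar] else []
  | e :: es =>
    if e = "bar" ∧ bar.length > 0 then
      (if bar.head? = some "bar" then [bar] else []) ++ goA [e] es
    else goA (bar ++ [e]) es

lemma foldl_goA (es : List String) : ∀ (bars : List (List String)) (bar : List String),
    (if ((es.foldl etbStep (bars, bar)).2).length > 0
      then (es.foldl etbStep (bars, bar)).1 ++ [(es.foldl etbStep (bars, bar)).2]
      else (es.foldl etbStep (bars, bar)).1) = bars ++ goA bar es := by
  induction es with
  | nil =>
    intro bars bar
    simp only [List.foldl_nil, goA]
    split_ifs <;> simp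
  | cons e es ih =>
    intro bars bar
    simp only [List.foldl_cons, goA]
    by_cases h : e = "bar" ∧ bar.length > 0
    · simp only [etbStep, if_pos h]
      by_cases hh : bar.head? = some "bar"
      · rw [if_pos hh]; simp only [ih, if_pos hh]; simp
      · rw [if_neg hh]; simp only [ih, if_neg hh]; simp
    · simp only [etbStep, if_neg h, ih]

lemma events_to_bars_eq_goA (events : List String) : events_to_bars events = goA [] events := by
  have := foldl_goA events [] []
  simpa [events_to_bars] using this

lemma goA_bar (es : List String) : ∀ (pre : List String), "bar" ∉ pre →
    goA ("bar" :: pre) es = ebAltLoop ("bar" :: pre ++ es) := by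
  induction es with
  | nil =>
    intro pre hpre
    rw [goA, ebAltLoop_none _ (by simpa using (PySem.List.index?_eq_none_iff pre "bar").mpr hpre)]
    simp
  | cons e es ih =>
    intro pre hpre
    by_cases he : e = "bar"
    · subst he
      rw [goA, if_pos (by simp)]
      have hidx : PySem.List.index? (("bar" :: pre ++ "bar" :: es).drop 1) "bar" = some pre.length := by
        simp only [List.cons_append, List.drop_succ_cons, List.drop_zero]
        exact (PySem.List.index?_eq_some_iff _ _ _).mpr ⟨pre, es, rfl, rfl, hpre⟩
      rw [ebAltLoop_some _ _ hidx]
      have hlen : pre.length + 1 = ("bar" :: pre).length := by simp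
      have htake : ("bar" :: pre ++ "bar" :: es).take (pre.length + 1) = "bar" :: pre := by
        rw [hlen, List.cons_append, ← List.cons_append, List.take_left]
      have hdrop : ("bar" :: pre ++ "bar" :: es).drop (pre.length + 1) = "bar" :: es := by
        rw [hlen, List.cons_append, ← List.cons_append, List.drop_left]
      rw [htake, hdrop]
      have := ih [] (by simp)
      simp [this]
    · rw [goA, if_neg (by simp [he])]
      have hm : "bar" ∉ pre ++ [e] := by
        simp [hpre]
        exact Ne.symm he
      have := ih (pre ++ [e]) hm
      simpa [List.append_assoc] using this

lemma goA_start (es : List String) : ∀ (pre : List String), pre ≠ [] → "bar" ∉ pre →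
    goA pre es = (match PySem.List.index? es "bar" with
                  | none => [pre ++ es]
                  | some i => ebAltLoop (es.drop i)) := by
  induction es with
  | nil =>
    intro pre hne _
    rw [goA]
    have : pre.length > 0 := List.length_pos_iff.mpr hne
    simp [this, PySem.List.index?]
  | cons e es ih =>
    intro pre hne hpre
    by_cases he : e = "bar"
    · subst he
      rw [goA, if_pos ⟨rfl, List.length_pos_iff.mpr hne⟩]
      have hh : pre.head? ≠ some "bar" := by
        intro hc
        apply hpre
        cases pre with
        | nil => simp at hc
        | cons a l => simp at hc; simp [hc]
      rw [if_neg hh]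
      have hb := goA_bar es [] (by simp)
      rw [hb]
      rw [PySem.List.index?_cons_self]
      simp
    · rw [goA, if_neg (by simp [he])]
      rw [ih (pre ++ [e]) (by simp) (by simp [hpre]; exact Ne.symm he)]
      rw [PySem.List.index?_cons_of_ne _ he]
      cases hidx : PySem.List.index? es "bar" with
      | none => simp
      | some i => simp

-- ===== VERDICT (by name: the statement is the Claim_ definition above) =====
theorem events_to_bars_spec : Claim_equal_events_to_bars := by
  intro events _
  unfold Spec_events_to_bars
  rw [events_to_bars_eq_goA]
  cases events with
  | nil => simp [goA, events_to_bars_alt, PySem.List.index?]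
  | cons e es =>
    rw [goA, if_neg (by simp)]
    by_cases he : e = "bar"
    · subst he
      have hb := goA_bar es [] (by simp)
      rw [List.nil_append, hb]
      unfold events_to_bars_alt
      rw [PySem.List.index?_cons_self]
      simp
    · rw [List.nil_append, goA_start es [e] (by simp) (by simp; exact Ne.symm he)]
      unfold events_to_bars_alt
      rw [PySem.List.index?_cons_of_ne _ he]
      cases hidx : PySem.List.index? es "bar" with
      | none => simp
      | some i => simp
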